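-- pv_equiv track=rewrite | github.com/mikonnikova/Noun_groups | X_features.py | get_info_from_corpus
-- ===== SOURCE A (Python) =====
-- def get_info_from_corpus(corpus_info):
--     words = []
--     pos = []
--     feats = []
--     entities = []
--
--     info = corpus_info.split()
--     for word_count in range(len(info)//5):
--         words.append(info[word_count*5 + 2])  # lemmas
--         pos.append(info[word_count*5 + 3])  # part-of-speech tags
--         feats.append(info[word_count*5 + 4])  # additional part-of-speech features
--         # get words starting with title letters (entities candidates)
--         if word_count>0 and info[word_count*5 + 1].istitle():
--             entities.append(1)
--         else:
--             entities.append(0)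
--
--     return words, pos, feats, entities
-- ===== SOURCE B (Python) =====
-- def get_info_from_corpus(corpus_info):
--     info = corpus_info.split()
--     # build the table of complete 5-token records, then read each column separately
--     rows = []
--     while len(info) >= 5:
--         rows.append(info[:5])
--         info = info[5:]
--     words = [r[2] for r in rows]
--     pos = [r[3] for r in rows]
--     feats = [r[4] for r in rows]
--     entities = [1 if i > 0 and r[1].istitle() else 0 for i, r in enumerate(rows)]
--     return words, pos, feats, entities
-- ===== Notes on version B (the rewrite author's own statement) =====
-- stated objective: alternative
-- what changed: Replaces the single index-arithmetic loop that appends to four lists simultaneously with a table-then-columns decomposition: the tokens are first chunked into complete 5-token rows, then each output list is produced by its own column pass (comprehensions / enumerate for the entity flags).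
import Mathlib
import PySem

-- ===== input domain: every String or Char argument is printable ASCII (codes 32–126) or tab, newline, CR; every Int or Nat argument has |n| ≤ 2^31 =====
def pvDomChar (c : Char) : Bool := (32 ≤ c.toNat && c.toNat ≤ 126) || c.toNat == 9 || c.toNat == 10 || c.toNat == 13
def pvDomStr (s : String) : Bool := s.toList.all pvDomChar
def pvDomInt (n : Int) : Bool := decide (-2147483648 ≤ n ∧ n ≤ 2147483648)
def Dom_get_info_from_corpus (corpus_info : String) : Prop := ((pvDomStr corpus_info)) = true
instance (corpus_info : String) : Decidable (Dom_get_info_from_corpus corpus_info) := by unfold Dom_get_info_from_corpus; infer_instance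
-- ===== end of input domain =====

-- B replaces A's single index-arithmetic loop (appending to four lists at once) by a table of complete
-- 5-token rows read off column by column; same return value, no speed claim.

-- ===== PORT A =====
-- str.istitle(), exact on the ASCII domain (no non-ASCII cased/titlecase chars there): CPython's scan, by hand
def pyIstitleAux : List Char → Bool → Bool → Bool
  | [], _, cased => cased
  | c :: cs, prev, cased =>
    if 'A' ≤ c ∧ c ≤ 'Z' then
      if prev then false else pyIstitleAux cs true true
    else if 'a' ≤ c ∧ c ≤ 'z' then
      if prev then pyIstitleAux cs true true else false
    else pyIstitleAux cs false cased

def pyIstitle (s : String) : Bool := pyIstitleAux s.toList false false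

def get_info_from_corpus (corpus_info : String) : List String × List String × List String × List Int :=
  let info := PySem.Str.split₀ corpus_info
  (PySem.List.pyRange 0 (PySem.Int.floordiv (info.length : Int) 5) 1).foldl
    (fun s wc =>
      (s.1 ++ [PySem.List.pyGetD info (wc * 5 + 2) ""],
       s.2.1 ++ [PySem.List.pyGetD info (wc * 5 + 3) ""],
       s.2.2.1 ++ [PySem.List.pyGetD info (wc * 5 + 4) ""],
       s.2.2.2 ++ [if 0 < wc ∧ pyIstitle (PySem.List.pyGetD info (wc * 5 + 1) "") = true then (1 : Int) else 0]))
    ([], [], [], [])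

-- ===== PORT B =====
-- the 'while len(info) >= 5: rows.append(info[:5]); info = info[5:]' chunker of Source B
def pvRows : List String → List (List String)
  | a :: b :: c :: d :: e :: rest => [a, b, c, d, e] :: pvRows rest
  | _ => []

def get_info_from_corpus_alt (corpus_info : String) : List String × List String × List String × List Int :=
  let info := PySem.Str.split₀ corpus_info
  let rows := pvRows info
  (rows.map (fun r => PySem.List.pyGetD r 2 ""),
   rows.map (fun r => PySem.List.pyGetD r 3 ""),
   rows.map (fun r => PySem.List.pyGetD r 4 ""),
   (PySem.List.enumerate rows).map
     (fun p => if 0 < p.1 ∧ pyIstitle (PySem.List.pyGetD p.2 1 "") = true then (1 : Int) else 0))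

-- ===== PRECONDITION & SPEC =====
def Spec_get_info_from_corpus (corpus_info : String) (out : List String × List String × List String × List Int) : Prop := out = get_info_from_corpus_alt corpus_info
instance (corpus_info : String) (out : List String × List String × List String × List Int) : Decidable (Spec_get_info_from_corpus corpus_info out) := by unfold Spec_get_info_from_corpus; infer_instance

-- ===== CLAIM (what is proved, stated in full; the proofs are below) =====
def Claim_equal_get_info_from_corpus : Prop := ∀ (corpus_info : String), Dom_get_info_from_corpus corpus_info → Spec_get_info_from_corpus corpus_info (get_info_from_corpus corpus_info)

-- ===== LEMMAS AND PROOFS =====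

lemma pvRows_small (info : List String)
    (h : ∀ (a b c d e : String) (rest : List String), info = a :: b :: c :: d :: e :: rest → False) :
    info.length < 5 := by
  match info with
  | [] => simp
  | [_] => simp
  | [_, _] => simp
  | [_, _, _] => simp
  | [_, _, _, _] => simp
  | a :: b :: c :: d :: e :: r => exact absurd rfl (h a b c d e r)

lemma pvRows_length (info : List String) : (pvRows info).length = info.length / 5 := by
  fun_induction pvRows info with
  | case1 a b c d e rest ih => simp [ih]; omega
  | case2 info h =>
    have := pvRows_small info h
    simp
    omega

lemma pvRows_col (info : List String) (j : Nat) (hj : j < (pvRows info).length) (k : Nat) (hk : k < 5) :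
    ((pvRows info)[j]'hj).getD k "" = info.getD (j * 5 + k) "" := by
  induction info using pvRows.induct generalizing j with
  | case1 a b c d e rest ih =>
    match j with
    | 0 =>
      match k, hk with
      | 0, _ => rfl
      | 1, _ => rfl
      | 2, _ => rfl
      | 3, _ => rfl
      | 4, _ => rfl
    | j + 1 =>
      have hj' : j < (pvRows rest).length := by simpa [pvRows] using hj
      have h5 : (j + 1) * 5 + k = (j * 5 + k) + 1 + 1 + 1 + 1 + 1 := by ring
      rw [h5]
      have key : (pvRows (a :: b :: c :: d :: e :: rest))[j + 1]'hj = (pvRows rest)[j]'hj' := rfl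
      rw [key]
      rw [List.getD_cons_succ, List.getD_cons_succ, List.getD_cons_succ, List.getD_cons_succ,
        List.getD_cons_succ]
      exact ih j hj'
  | case2 info h =>
    have := pvRows_small info h
    rw [pvRows_length] at hj
    omega

-- A's one loop appending to four lists at once is the four per-column maps (4-component instance of
-- PySem.List.foldl_prod_mk / foldl_append_singleton_eq_map, specific to this accumulator shape)
lemma pvFoldSplit (g2 g3 g4 : Int → String) (g1 : Int → Int) (l : List Int)
    (w p f : List String) (e : List Int) :
    l.foldl (fun s wc => (s.1 ++ [g2 wc], s.2.1 ++ [g3 wc], s.2.2.1 ++ [g4 wc], s.2.2.2 ++ [g1 wc]))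
      (w, p, f, e)
    = (w ++ l.map g2, p ++ l.map g3, f ++ l.map g4, e ++ l.map g1) := by
  induction l generalizing w p f e with
  | nil => simp
  | cons x t ih => simp [List.foldl_cons, ih]

lemma pvColEq (info : List String) (m : Nat) (hm : m = info.length / 5)
    (ki : Int) (k : Nat) (hki : ki = (k : Int)) (hk : k < 5) :
    (PySem.List.pyRange 0 (m : Int) 1).map (fun wc => PySem.List.pyGetD info (wc * 5 + ki) "")
    = (pvRows info).map (fun r => PySem.List.pyGetD r ki "") := by
  subst hm hki
  rw [PySem.List.pyRange_zero_nat]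
  apply List.ext_getElem
  · simp [pvRows_length]
  · intro j h1 h2
    have hj : j < (pvRows info).length := by simpa using h2
    simp only [List.getElem_map, List.getElem_range]
    rw [show ((j : Int) * 5 + (k : Int)) = ((j * 5 + k : Nat) : Int) by push_cast; ring]
    rw [PySem.List.pyGetD_natCast, PySem.List.pyGetD_natCast]
    exact (pvRows_col info j hj k hk).symm

lemma pvEntEq (info : List String) (m : Nat) (hm : m = info.length / 5) :
    (PySem.List.pyRange 0 (m : Int) 1).map
        (fun wc => if 0 < wc ∧ pyIstitle (PySem.List.pyGetD info (wc * 5 + 1) "") = true then (1 : Int) else 0)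
    = (PySem.List.enumerate (pvRows info)).map
        (fun p => if 0 < p.1 ∧ pyIstitle (PySem.List.pyGetD p.2 1 "") = true then (1 : Int) else 0) := by
  subst hm
  rw [PySem.List.pyRange_zero_nat]
  apply List.ext_getElem
  · simp [pvRows_length, PySem.List.length_enumerate]
  · intro j h1 h2
    have hj : j < (pvRows info).length := by
      simpa [PySem.List.length_enumerate] using h2
    simp only [List.getElem_map, List.getElem_range, PySem.List.getElem_enumerate]
    rw [PySem.List.pyGetD_ofNat']
    rw [show ((j : Int) * 5 + 1) = ((j * 5 + 1 : Nat) : Int) by push_cast; ring]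
    rw [PySem.List.pyGetD_natCast]
    rw [pvRows_col info j hj 1 (by norm_num)]
    simp

lemma pvMain (info : List String) :
    (PySem.List.pyRange 0 (PySem.Int.floordiv (info.length : Int) 5) 1).foldl
      (fun s wc =>
        (s.1 ++ [PySem.List.pyGetD info (wc * 5 + 2) ""],
         s.2.1 ++ [PySem.List.pyGetD info (wc * 5 + 3) ""],
         s.2.2.1 ++ [PySem.List.pyGetD info (wc * 5 + 4) ""],
         s.2.2.2 ++ [if 0 < wc ∧ pyIstitle (PySem.List.pyGetD info (wc * 5 + 1) "") = true then (1 : Int) else 0]))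
      ([], [], [], [])
    = ((pvRows info).map (fun r => PySem.List.pyGetD r 2 ""),
       (pvRows info).map (fun r => PySem.List.pyGetD r 3 ""),
       (pvRows info).map (fun r => PySem.List.pyGetD r 4 ""),
       (PySem.List.enumerate (pvRows info)).map
         (fun p => if 0 < p.1 ∧ pyIstitle (PySem.List.pyGetD p.2 1 "") = true then (1 : Int) else 0)) := by
  rw [pvFoldSplit]
  rw [show PySem.Int.floordiv ((info.length : Nat) : Int) 5 = ((info.length / 5 : Nat) : Int) by
    exact_mod_cast PySem.Int.floordiv_natCast info.length 5]
  simp only [List.nil_append]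
  rw [pvColEq info (info.length / 5) rfl 2 2 (by norm_num) (by norm_num)]
  rw [pvColEq info (info.length / 5) rfl 3 3 (by norm_num) (by norm_num)]
  rw [pvColEq info (info.length / 5) rfl 4 4 (by norm_num) (by norm_num)]
  rw [pvEntEq info (info.length / 5) rfl]

-- ===== VERDICT (by name: the statement is the Claim_ definition above) =====
theorem get_info_from_corpus_spec : Claim_equal_get_info_from_corpus := by
  intro c _
  unfold Spec_get_info_from_corpus get_info_from_corpus get_info_from_corpus_alt
  exact pvMain (PySem.Str.split₀ c)
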